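-- pv_equiv track=rewrite | github.com/poleha/py_examples | learn/sporting/brackets_rotation.py | get_sum3
-- ===== SOURCE A (Python) =====
-- def get_sum3(errors, L):
--     if not errors:
--         return L
--     max_s = 0
--     prev_stop = None
--     stop = None
--     for stop in errors:
--         if prev_stop is None:
--             s = stop
--         else:
--             s = stop - prev_stop - 1
--         max_s = max(s, max_s)
--         prev_stop = stop
--     if stop is not None and stop < L - 1:
--         max_s = max(max_s, L - stop - 1)
--     return max_s
-- ===== SOURCE B (Python) =====
-- def _dc(errors, lo, hi, left, right):
--     """Max gap within errors[lo:hi], given the adjacent boundary positions left and right."""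
--     if lo == hi:
--         return right - left - 1
--     mid = (lo + hi) // 2
--     m = errors[mid]
--     return max(_dc(errors, lo, mid, left, m), _dc(errors, mid + 1, hi, m, right))
--
--
-- def get_sum3(errors, L):
--     if not errors:
--         return L
--     return max(0, _dc(errors, 0, len(errors), -1, L))
-- ===== Notes on version B (the rewrite author's own statement) =====
-- stated objective: alternative
-- what changed: Replaces A's left-to-right loop with None-sentinel state and post-loop trailing-gap branch by a divide-and-conquer recursion over index ranges that passes the two adjacent boundary positions (-1 and L at the top) down to each half, so every gap is one subtraction at a leaf.
import Mathlib
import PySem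

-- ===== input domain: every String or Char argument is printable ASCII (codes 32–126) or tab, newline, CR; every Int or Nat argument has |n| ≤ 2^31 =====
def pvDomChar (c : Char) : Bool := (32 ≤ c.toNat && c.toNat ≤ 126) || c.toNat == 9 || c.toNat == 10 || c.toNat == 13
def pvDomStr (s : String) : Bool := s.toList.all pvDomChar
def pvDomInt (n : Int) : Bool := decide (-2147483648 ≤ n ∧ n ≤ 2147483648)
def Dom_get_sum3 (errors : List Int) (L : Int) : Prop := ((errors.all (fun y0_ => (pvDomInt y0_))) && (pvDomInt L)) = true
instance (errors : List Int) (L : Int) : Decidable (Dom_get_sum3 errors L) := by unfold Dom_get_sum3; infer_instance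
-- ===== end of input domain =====

-- B replaces A's left-to-right sentinel-state loop by a divide-and-conquer recursion over index
-- ranges that hands the two adjacent boundary positions down to each half; equal on all inputs.

-- ===== PORT A =====
-- loop state: (max_s, prev_stop); the loop variable `stop` equals prev_stop after each iteration
def get_sum3 (errors : List Int) (L : Int) : Int :=
  if errors = [] then L
  else
    let st := errors.foldl
      (fun (p : Int × Option Int) stop =>
        let s := match p.2 with
          | none => stop
          | some prev => stop - prev - 1
        (max s p.1, some stop))
      (0, none)
    match st.2 with
    | some stop => if stop < L - 1 then max st.1 (L - stop - 1) else st.1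
    | none => st.1

-- ===== PORT B =====
-- _dc: max gap within errors[lo:hi], given the adjacent boundary positions left and right.
-- The Python base case is `lo == hi`; every reachable call has lo ≤ hi, so the `hi ≤ lo`
-- test (needed for Lean's termination measure) is identical there.  errors[mid] is always
-- in range on reachable calls, so getD 0 equals Python's indexing.
def pvDc (errors : List Int) (lo hi : Nat) (left right : Int) : Int :=
  if hi ≤ lo then right - left - 1
  else
    let mid := (lo + hi) / 2
    let m := errors.getD mid 0
    max (pvDc errors lo mid left m) (pvDc errors (mid + 1) hi m right)
termination_by hi - lo
decreasing_by all_goals omega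

def get_sum3_alt (errors : List Int) (L : Int) : Int :=
  if errors = [] then L
  else max 0 (pvDc errors 0 errors.length (-1) L)

-- ===== PRECONDITION & SPEC =====
def Spec_get_sum3 (errors : List Int) (L : Int) (out : Int) : Prop := out = get_sum3_alt errors L
instance (errors : List Int) (L : Int) (out : Int) : Decidable (Spec_get_sum3 errors L out) := by unfold Spec_get_sum3; infer_instance

-- ===== CLAIM (what is proved, stated in full; the proofs are below) =====
def Claim_equal_get_sum3 : Prop := ∀ (errors : List Int) (L : Int), Dom_get_sum3 errors L → Spec_get_sum3 errors L (get_sum3 errors L)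

-- ===== LEMMAS AND PROOFS =====

-- adjacent gaps of p :: l
def pvGaps : Int → List Int → List Int
  | _, [] => []
  | p, x :: xs => (x - p - 1) :: pvGaps x xs

-- the slice errors[lo:hi]
def pvSeg (l : List Int) (lo hi : Nat) : List Int := (l.drop lo).take (hi - lo)

def pvStep (p : Int × Option Int) (stop : Int) : Int × Option Int :=
  let s := match p.2 with
    | none => stop
    | some prev => stop - prev - 1
  (max s p.1, some stop)

theorem pvStep_eq : (fun (p : Int × Option Int) stop =>
    let s := match p.2 with
      | none => stop
      | some prev => stop - prev - 1
    (max s p.1, some stop)) = pvStep := rfl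

theorem foldA_char (l : List Int) : ∀ (m p : Int),
    l.foldl pvStep (m, some p) = ((pvGaps p l).foldl max m, some (l.getLastD p)) := by
  induction l with
  | nil => intro m p; rfl
  | cons x xs ih =>
    intro m p
    simp only [List.foldl_cons, pvStep, pvGaps, List.getLastD_cons]
    rw [Int.max_comm m (x - p - 1)]
    exact ih _ _

theorem pvGaps_append (l : List Int) : ∀ (p L : Int),
    pvGaps p (l ++ [L]) = pvGaps p l ++ [L - l.getLastD p - 1] := by
  induction l with
  | nil => intro p L; rfl
  | cons x xs ih => intro p L; simp only [List.cons_append, pvGaps, ih, List.getLastD_cons]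

theorem pvGaps_split (l1 : List Int) : ∀ (p x : Int) (l2 : List Int),
    pvGaps p (l1 ++ x :: l2) = pvGaps p (l1 ++ [x]) ++ pvGaps x l2 := by
  induction l1 with
  | nil => intro p x l2; rfl
  | cons y ys ih =>
    intro p x l2
    simp only [List.cons_append, pvGaps]
    rw [ih]

theorem le_foldl_max (l : List Int) : ∀ (m : Int), m ≤ l.foldl max m := by
  induction l with
  | nil => intro m; exact le_refl m
  | cons x xs ih =>
    intro m
    simp only [List.foldl_cons]
    exact le_trans (le_max_left m x) (ih (max m x))

theorem seg_split (l : List Int) (lo mid hi : Nat)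
    (h1 : lo ≤ mid) (h2 : mid < hi) (h3 : hi ≤ l.length) :
    pvSeg l lo hi = pvSeg l lo mid ++ l.getD mid 0 :: pvSeg l (mid + 1) hi := by
  have hm : mid < l.length := lt_of_lt_of_le h2 h3
  have hget : l.getD mid 0 = l[mid] := List.getD_eq_getElem l 0 hm
  have hsum : hi - lo = (mid - lo) + (hi - mid) := by omega
  have hdm : lo + (mid - lo) = mid := by omega
  have htail : hi - mid = (hi - (mid + 1)) + 1 := by omega
  calc pvSeg l lo hi
      = (l.drop lo).take ((mid - lo) + (hi - mid)) := by rw [pvSeg, hsum]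
    _ = pvSeg l lo mid ++ ((l.drop mid).take (hi - mid)) := by
        rw [List.take_add, pvSeg, List.drop_drop, hdm]
    _ = pvSeg l lo mid ++ l.getD mid 0 :: pvSeg l (mid + 1) hi := by
        rw [List.drop_eq_getElem_cons hm, htail, List.take_succ_cons, hget]
        simp [pvSeg]

theorem dc_char (l : List Int) : ∀ (k lo hi : Nat), hi - lo ≤ k → lo ≤ hi → hi ≤ l.length →
    ∀ (left right a : Int),
      max a (pvDc l lo hi left right) = (pvGaps left (pvSeg l lo hi ++ [right])).foldl max a := by
  intro k
  induction k with
  | zero =>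
    intro lo hi hk hle _ left right a
    have : lo = hi := by omega
    subst this
    rw [pvDc]
    simp [pvSeg, pvGaps]
  | succ k ih =>
    intro lo hi hk hle hlen left right a
    by_cases heq : hi ≤ lo
    · have : lo = hi := by omega
      subst this
      rw [pvDc]
      simp [pvSeg, pvGaps]
    · rw [pvDc]
      simp only [if_neg heq]
      set mid := (lo + hi) / 2 with hmid
      have hb1 : lo ≤ mid := by omega
      have hb2 : mid < hi := by omega
      set m := l.getD mid 0 with hm
      rw [← max_assoc]
      rw [ih lo mid (by omega) hb1 (by omega) left m a]
      rw [ih (mid + 1) hi (by omega) (by omega) hlen m right _]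
      rw [seg_split l lo mid hi hb1 hb2 hlen, ← hm]
      rw [List.append_assoc, List.cons_append]
      rw [pvGaps_split (pvSeg l lo mid) left m (pvSeg l (mid + 1) hi ++ [right]),
        List.foldl_append]

theorem pvSeg_full (l : List Int) : pvSeg l 0 l.length = l := by
  simp [pvSeg]

-- ===== VERDICT (by name: the statement is the Claim_ definition above) =====
theorem get_sum3_spec : Claim_equal_get_sum3 := by
  intro errors L _
  unfold Spec_get_sum3 get_sum3 get_sum3_alt
  cases errors with
  | nil => simp
  | cons e es =>
    simp only [reduceCtorEq, if_false]
    rw [pvStep_eq]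
    -- A side
    have hA : (e :: es).foldl pvStep (0, none) =
        ((pvGaps e es).foldl max (max e 0), some (es.getLastD e)) := by
      have : (e :: es).foldl pvStep (0, none) = es.foldl pvStep (max e 0, some e) := rfl
      rw [this, foldA_char]
    rw [hA]
    -- B side
    have hB : max 0 (pvDc (e :: es) 0 (e :: es).length (-1) L) =
        (pvGaps (-1) ((e :: es) ++ [L])).foldl max 0 := by
      rw [dc_char (e :: es) (e :: es).length 0 (e :: es).length (by omega) (by omega) le_rfl,
        pvSeg_full]
    rw [hB]
    have hgaps : pvGaps (-1) ((e :: es) ++ [L])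
        = (e - (-1) - 1) :: (pvGaps e es ++ [L - es.getLastD e - 1]) := by
      simp only [List.cons_append, pvGaps, pvGaps_append]
    rw [hgaps]
    simp only [List.foldl_cons, List.foldl_append, List.foldl_cons, List.foldl_nil]
    have hseed : max 0 (e - (-1) - 1) = max e 0 := by omega
    rw [hseed]
    have hM : (0 : Int) ≤ (pvGaps e es).foldl max (max e 0) :=
      le_trans (le_max_right e 0) (le_foldl_max _ _)
    set M := (pvGaps e es).foldl max (max e 0) with hMdef
    set last := es.getLastD e with hlast
    split_ifs with h <;> omega
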